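-- pv_equiv track=rewrite | github.com/qjalian/Lab1-SPiMP | main.py | increasing_subsequences
-- ===== SOURCE A (Python) =====
-- def increasing_subsequences(sequence, current_sequence=None, result=None):
--     if current_sequence is None:
--         current_sequence = ()
--     if result is None:
--         result = []
--
--     if not sequence:
--         return result
--
--     number, *rest = sequence
--
--     if current_sequence and number >= current_sequence[-1]:
--         new_sequence = current_sequence + (number,)
--         if len(new_sequence) >= 2:
--             result.append(new_sequence)
--         increasing_subsequences(rest, new_sequence, result)
--     else:
--         increasing_subsequences(rest, (number,), result)
--
--     return result
-- ===== SOURCE B (Python) =====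
-- def increasing_subsequences(sequence, current_sequence=None, result=None):
--     # Iterative single pass over the sequence; same defaulted accumulators,
--     # mutates and returns the same `result` list as A does.
--     if result is None:
--         result = []
--     current = current_sequence if current_sequence else ()
--     for number in sequence:
--         if current and number >= current[-1]:
--             current = current + (number,)
--             if len(current) >= 2:
--                 result.append(current)
--         else:
--             current = (number,)
--     return result
-- ===== Notes on version B (the rewrite author's own statement) =====
-- stated objective: simpler
-- what changed: Replaced A's tail recursion peeling one element per call with a single iterative for-loop carrying the current run tuple, keeping the same defaulted accumulator parameters and mutating the same result list.
import Mathlib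
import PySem

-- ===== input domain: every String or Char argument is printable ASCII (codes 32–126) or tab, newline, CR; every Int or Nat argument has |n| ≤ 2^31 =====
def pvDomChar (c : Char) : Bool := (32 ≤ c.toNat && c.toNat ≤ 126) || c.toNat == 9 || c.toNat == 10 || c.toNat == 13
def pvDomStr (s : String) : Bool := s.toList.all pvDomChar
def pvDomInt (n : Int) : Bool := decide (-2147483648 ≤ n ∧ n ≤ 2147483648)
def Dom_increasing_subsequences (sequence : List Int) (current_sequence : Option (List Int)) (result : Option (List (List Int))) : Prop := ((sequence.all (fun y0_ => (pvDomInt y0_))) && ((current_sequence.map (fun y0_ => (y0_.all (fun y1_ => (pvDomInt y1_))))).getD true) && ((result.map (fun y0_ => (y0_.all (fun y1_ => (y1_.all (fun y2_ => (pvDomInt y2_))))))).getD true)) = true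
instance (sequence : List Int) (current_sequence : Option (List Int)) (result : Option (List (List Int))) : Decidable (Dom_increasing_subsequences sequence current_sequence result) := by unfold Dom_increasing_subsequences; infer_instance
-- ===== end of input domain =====

-- B replaces A's per-element tail recursion with a single iterative for-loop (ported as a fold); same return value, and B mutates the passed result list exactly as A does.


-- ===== PORT A =====
-- A's recursion: sequence head peeled each call; result threaded as accumulator (return value only)
def pvRecA (sequence : List Int) (current_sequence : List Int) (result : List (List Int)) : List (List Int) :=
  match sequence with
  | [] => result
  | number :: rest =>
    if current_sequence ≠ [] ∧ number ≥ current_sequence.getLast! then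
      let new_sequence := current_sequence ++ [number]
      let result' := if new_sequence.length ≥ 2 then result ++ [new_sequence] else result
      pvRecA rest new_sequence result'
    else
      pvRecA rest [number] result

def increasing_subsequences (sequence : List Int) (current_sequence : Option (List Int)) (result : Option (List (List Int))) : List (List Int) :=
  pvRecA sequence (current_sequence.getD []) (result.getD [])

-- ===== PORT B =====
-- B: one fold over the sequence carrying (result, current run)
def pvStepB (st : List (List Int) × List Int) (number : Int) : List (List Int) × List Int :=
  if st.2 ≠ [] ∧ number ≥ st.2.getLast! then
    let current := st.2 ++ [number]
    ((if current.length ≥ 2 then st.1 ++ [current] else st.1), current)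
  else (st.1, [number])

def increasing_subsequences_alt (sequence : List Int) (current_sequence : Option (List Int)) (result : Option (List (List Int))) : List (List Int) :=
  (sequence.foldl pvStepB (result.getD [], current_sequence.getD [])).1

-- ===== PRECONDITION & SPEC =====
def Spec_increasing_subsequences (sequence : List Int) (current_sequence : Option (List Int)) (result : Option (List (List Int))) (out : List (List Int)) : Prop := out = increasing_subsequences_alt sequence current_sequence result
instance (sequence : List Int) (current_sequence : Option (List Int)) (result : Option (List (List Int))) (out : List (List Int)) : Decidable (Spec_increasing_subsequences sequence current_sequence result out) := by unfold Spec_increasing_subsequences; infer_instance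

-- ===== CLAIM (what is proved, stated in full; the proofs are below) =====
def Claim_equal_increasing_subsequences : Prop := ∀ (sequence : List Int) (current_sequence : Option (List Int)) (result : Option (List (List Int))), Dom_increasing_subsequences sequence current_sequence result → Spec_increasing_subsequences sequence current_sequence result (increasing_subsequences sequence current_sequence result)

-- ===== LEMMAS AND PROOFS =====

-- ===== VERDICT (by name: the statement is the Claim_ definition above) =====
lemma pvRecA_eq_fold (sequence : List Int) :
    ∀ (cur : List Int) (res : List (List Int)),
      pvRecA sequence cur res = (sequence.foldl pvStepB (res, cur)).1 := by
  induction sequence with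
  | nil => intro cur res; simp [pvRecA]
  | cons n rest ih =>
    intro cur res
    simp only [pvRecA, List.foldl_cons, pvStepB]
    by_cases h : cur ≠ [] ∧ n ≥ cur.getLast!
    · simp only [if_pos h]; exact ih _ _
    · simp only [if_neg h]; exact ih _ _

theorem increasing_subsequences_spec : Claim_equal_increasing_subsequences := by
  intro sequence current_sequence result _
  unfold Spec_increasing_subsequences increasing_subsequences increasing_subsequences_alt
  exact pvRecA_eq_fold sequence _ _
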